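-- pv_equiv track=rewrite | github.com/zhanghuiyong/pm_review | arxiv_crossref_imput.py | match_authors_between_arxiv_and_crossref
-- ===== SOURCE A (Python) =====
-- def match_authors_between_arxiv_and_crossref(arxiv_entry, crossref_entry):
--     """
--     Match authors between arXiv and CrossRef entries by surname (robust implementation)
--
--     Args:
--         arxiv_entry (dict): arXiv metadata entry containing author information
--         crossref_entry (dict): CrossRef metadata entry containing author information
--
--     Returns:
--         bool: True if at least one common author (by surname) is found, False otherwise
--     """
--     # Early return if author field is missing in either entry
--     if 'author' not in arxiv_entry or 'author' not in crossref_entry: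
--         return False
--
--     def extract_surname_from_full_name(full_name):
--         """
--         Extract surname from a full name string (handles edge cases)
--
--         Args:
--             full_name (str): Full name (e.g., "John Doe", "Einstein", "Mary Ann Smith")
--
--         Returns:
--             str: Lowercase surname (empty string if input is invalid)
--         """
--         # Handle empty/None input
--         if not full_name or not isinstance(full_name, str):
--             return ""
--
--         # Clean whitespace and split name parts
--         name_parts = full_name.strip().split()
--
--         # Return last part as surname (handles single-name authors)
--         return name_parts[-1].lower() if name_parts else ""
--
--     # -------------------------- Process arXiv Authors --------------------------
--     # arXiv authors format: "Author1 and Author2 and Author3"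
--     arxiv_author_full_names = arxiv_entry['author'].split(' and ')
--     arxiv_surnames = set()
--
--     for full_name in arxiv_author_full_names:
--         surname = extract_surname_from_full_name(full_name)
--         if surname:  # Only add non-empty surnames
--             arxiv_surnames.add(surname)
--
--     # -------------------------- Process CrossRef Authors --------------------------
--     # CrossRef authors format: list of dicts with 'family' (surname) and 'given' (first name)
--     crossref_surnames = set()
--
--     for author_dict in crossref_entry['author']:
--         # Extract and clean surname from CrossRef author dict
--         surname = author_dict.get('family', '').strip().lower()
--         if surname:  # Only add non-empty surnames
--             crossref_surnames.add(surname)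
--
--     # -------------------------- Author Matching Logic --------------------------
--     # Check for at least one common surname (handle empty sets to avoid false positives)
--     if not arxiv_surnames or not crossref_surnames:
--         return False
--
--     # Find intersection of surname sets
--     common_surnames = arxiv_surnames.intersection(crossref_surnames)
--
--     # Return True if any common authors found
--     return len(common_surnames) > 0
-- ===== SOURCE B (Python) =====
-- def match_authors_between_arxiv_and_crossref(arxiv_entry, crossref_entry):
--     """Same result as A, but by a different algorithm: sort both surname
--     collections and advance two pointers over the sorted lists, stopping at
--     the first common element (merge-step intersection, no hashing)."""
--     if 'author' not in arxiv_entry or 'author' not in crossref_entry: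
--         return False
--
--     def surname(full_name):
--         parts = full_name.strip().split()
--         return parts[-1].lower() if parts else ""
--
--     xs = sorted(filter(None, {surname(n) for n in arxiv_entry['author'].split(' and ')}))
--     ys = sorted(filter(None, {a.get('family', '').strip().lower() for a in crossref_entry['author']}))
--
--     i = j = 0
--     while i < len(xs) and j < len(ys):
--         if xs[i] == ys[j]:
--             return True
--         if xs[i] < ys[j]:
--             i += 1
--         else:
--             j += 1
--     return False
-- ===== Notes on version B (the rewrite author's own statement) =====
-- stated objective: alternative
-- what changed: B replaces A's hash-set intersection by a comparison-based algorithm: it sorts the two deduplicated surname collections and runs a two-pointer merge scan over the sorted lists, returning True at the first common element, with no intersection set and no membership hashing.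
import Mathlib
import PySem

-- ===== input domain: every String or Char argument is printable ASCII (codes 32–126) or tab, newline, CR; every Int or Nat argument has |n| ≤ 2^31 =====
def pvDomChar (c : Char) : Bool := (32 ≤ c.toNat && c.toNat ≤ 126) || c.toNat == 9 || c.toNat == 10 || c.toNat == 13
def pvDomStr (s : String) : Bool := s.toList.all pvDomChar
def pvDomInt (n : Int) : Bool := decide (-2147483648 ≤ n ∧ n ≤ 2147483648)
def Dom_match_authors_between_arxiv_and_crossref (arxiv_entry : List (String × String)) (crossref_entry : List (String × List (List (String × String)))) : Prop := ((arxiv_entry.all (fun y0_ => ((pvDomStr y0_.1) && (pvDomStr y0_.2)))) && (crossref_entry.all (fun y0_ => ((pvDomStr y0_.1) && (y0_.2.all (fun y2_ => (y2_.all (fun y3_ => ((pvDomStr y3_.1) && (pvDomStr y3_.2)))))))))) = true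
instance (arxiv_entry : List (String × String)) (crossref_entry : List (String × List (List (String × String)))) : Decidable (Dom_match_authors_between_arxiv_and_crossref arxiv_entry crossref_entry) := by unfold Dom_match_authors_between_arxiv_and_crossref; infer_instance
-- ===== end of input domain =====

-- B replaces A's set-intersection by a comparison-based algorithm: sort both
-- deduplicated surname collections and find a common element with a
-- two-pointer merge scan (alternative algorithm, same result).

-- ===== PORT A =====
-- extract_surname_from_full_name (the isinstance branch can never fire: the argument is always a str)
def pvSurnameA (full_name : String) : String :=
  if full_name = "" then ""
  else
    let name_parts := PySem.Str.split₀ (PySem.Str.strip full_name)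
    if name_parts ≠ [] then PySem.Str.lower (PySem.List.pyGetD name_parts (-1) "") else ""

def match_authors_between_arxiv_and_crossref (arxiv_entry : List (String × String)) (crossref_entry : List (String × List (List (String × String)))) : Bool :=
  if (arxiv_entry.lookup "author").isNone || (crossref_entry.lookup "author").isNone then false
  else
    let arxiv_author_full_names := (PySem.Str.split? ((arxiv_entry.lookup "author").getD "") " and ").getD []
    let arxiv_surnames : PySem.Set String := arxiv_author_full_names.foldl
      (fun s full_name =>
        if pvSurnameA full_name ≠ "" then PySem.Set.add s (pvSurnameA full_name) else s) PySem.Set.empty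
    let crossref_surnames : PySem.Set String := ((crossref_entry.lookup "author").getD []).foldl
      (fun s author_dict =>
        if PySem.Str.lower (PySem.Str.strip ((author_dict.lookup "family").getD "")) ≠ "" then PySem.Set.add s (PySem.Str.lower (PySem.Str.strip ((author_dict.lookup "family").getD ""))) else s) PySem.Set.empty
    if arxiv_surnames = [] || crossref_surnames = [] then false
    else decide (0 < PySem.Set.len (PySem.Set.inter arxiv_surnames crossref_surnames))

-- ===== PORT B =====
def pvSurnameB (full_name : String) : String :=
  let parts := PySem.Str.split₀ (PySem.Str.strip full_name)
  if parts ≠ [] then PySem.Str.lower (PySem.List.pyGetD parts (-1) "") else ""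

-- the two-pointer while loop over the two sorted lists, as structural recursion on the suffixes
def pvMergeB : List String → List String → Bool
  | [], _ => false
  | _ :: _, [] => false
  | x :: xs, y :: ys =>
    if x = y then true
    else if x < y then pvMergeB xs (y :: ys)
    else pvMergeB (x :: xs) ys
termination_by xs ys => xs.length + ys.length

def match_authors_between_arxiv_and_crossref_alt (arxiv_entry : List (String × String)) (crossref_entry : List (String × List (List (String × String)))) : Bool :=
  if (arxiv_entry.lookup "author").isNone || (crossref_entry.lookup "author").isNone then false
  else
    let xs := PySem.List.sorted ((PySem.Set.ofList ((((PySem.Str.split? ((arxiv_entry.lookup "author").getD "") " and ").getD []).map pvSurnameB))).filter (· ≠ "")) (fun x => x) false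
    let ys := PySem.List.sorted ((PySem.Set.ofList (((crossref_entry.lookup "author").getD []).map (fun d => PySem.Str.lower (PySem.Str.strip ((d.lookup "family").getD ""))))).filter (· ≠ "")) (fun x => x) false
    pvMergeB xs ys

-- ===== PRECONDITION & SPEC =====
def Spec_match_authors_between_arxiv_and_crossref (arxiv_entry : List (String × String)) (crossref_entry : List (String × List (List (String × String)))) (out : Bool) : Prop := out = match_authors_between_arxiv_and_crossref_alt arxiv_entry crossref_entry
instance (arxiv_entry : List (String × String)) (crossref_entry : List (String × List (List (String × String)))) (out : Bool) : Decidable (Spec_match_authors_between_arxiv_and_crossref arxiv_entry crossref_entry out) := by unfold Spec_match_authors_between_arxiv_and_crossref; infer_instance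

-- ===== CLAIM (what is proved, stated in full; the proofs are below) =====
def Claim_equal_match_authors_between_arxiv_and_crossref : Prop := ∀ (arxiv_entry : List (String × String)) (crossref_entry : List (String × List (List (String × String)))), Dom_match_authors_between_arxiv_and_crossref arxiv_entry crossref_entry → Spec_match_authors_between_arxiv_and_crossref arxiv_entry crossref_entry (match_authors_between_arxiv_and_crossref arxiv_entry crossref_entry)

-- ===== LEMMAS AND PROOFS =====

-- A's surname extractor equals B's (B drops A's redundant empty-string early return)
theorem pvSurname_eq (n : String) : pvSurnameA n = pvSurnameB n := by
  by_cases h : n = ""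
  · subst h; decide
  · simp [pvSurnameA, pvSurnameB, h]

-- the two-pointer merge scan over ≤-sorted lists finds exactly a common element
theorem pvMergeB_iff : ∀ (xs ys : List String),
    xs.Pairwise (· ≤ ·) → ys.Pairwise (· ≤ ·) →
    (pvMergeB xs ys = true ↔ ∃ x, x ∈ xs ∧ x ∈ ys) := by
  intro xs ys
  induction xs, ys using pvMergeB.induct with
  | case1 ys => simp [pvMergeB]
  | case2 x xs => simp [pvMergeB]
  | case3 xs x ys =>
    intro _ _
    simp only [pvMergeB, if_true, true_iff]
    exact ⟨x, List.mem_cons_self, List.mem_cons_self⟩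
  | case4 x xs y ys hne hlt ih =>
    intro hx hy
    rw [pvMergeB, if_neg hne, if_pos hlt, ih (List.Pairwise.of_cons hx) hy]
    constructor
    · rintro ⟨z, hz1, hz2⟩; exact ⟨z, List.mem_cons_of_mem _ hz1, hz2⟩
    · rintro ⟨z, hz1, hz2⟩
      rcases List.mem_cons.mp hz1 with rfl | hz1'
      · -- z = x is in y :: ys, but x < y ≤ every element of y :: ys: contradiction
        exfalso
        rcases List.mem_cons.mp hz2 with rfl | hz2'
        · exact hne rfl
        · have hyz : y ≤ z := (List.pairwise_cons.mp hy).1 z hz2'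
          exact absurd (lt_of_lt_of_le hlt hyz) (lt_irrefl z)
      · exact ⟨z, hz1', hz2⟩
  | case5 x xs y ys hne hnlt ih =>
    intro hx hy
    have hyx : y < x := lt_of_le_of_ne (not_lt.mp hnlt) (fun h => hne h.symm)
    rw [pvMergeB, if_neg hne, if_neg hnlt, ih hx (List.Pairwise.of_cons hy)]
    constructor
    · rintro ⟨z, hz1, hz2⟩; exact ⟨z, hz1, List.mem_cons_of_mem _ hz2⟩
    · rintro ⟨z, hz1, hz2⟩
      rcases List.mem_cons.mp hz2 with rfl | hz2'
      · exfalso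
        rcases List.mem_cons.mp hz1 with rfl | hz1'
        · exact hne rfl
        · have hxz : x ≤ z := (List.pairwise_cons.mp hx).1 z hz1'
          exact absurd (lt_of_lt_of_le hyx hxz) (lt_irrefl z)
      · exact ⟨z, hz1, hz2'⟩

-- membership in the "add only the non-empty f n" foldl loop of port A
theorem mem_foldl_addif {α : Type} (f : α → String) :
    ∀ (l : List α) (s : PySem.Set String) (x : String),
      (x ∈ l.foldl (fun s n => if f n ≠ "" then PySem.Set.add s (f n) else s) s) ↔
        x ∈ s ∨ ∃ n ∈ l, f n ≠ "" ∧ f n = x := by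
  intro l
  induction l with
  | nil => simp
  | cons a t ih =>
    intro s x
    rw [List.foldl_cons]
    by_cases h : f a = ""
    · rw [if_neg (by simp [h]), ih]
      constructor
      · rintro (hs | ⟨n, hn, h1, h2⟩)
        · exact Or.inl hs
        · exact Or.inr ⟨n, List.mem_cons_of_mem _ hn, h1, h2⟩
      · rintro (hs | ⟨n, hn, h1, h2⟩)
        · exact Or.inl hs
        · rcases List.mem_cons.mp hn with rfl | hn'
          · exact absurd h h1
          · exact Or.inr ⟨n, hn', h1, h2⟩
    · rw [if_pos (by simp [h]), ih]
      constructor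
      · rintro (hs | ⟨n, hn, h1, h2⟩)
        · rcases (PySem.Set.mem_add s (f a) x).mp hs with hs' | he
          · exact Or.inl hs'
          · exact Or.inr ⟨a, List.mem_cons_self, h, he.symm⟩
        · exact Or.inr ⟨n, List.mem_cons_of_mem _ hn, h1, h2⟩
      · rintro (hs | ⟨n, hn, h1, h2⟩)
        · exact Or.inl ((PySem.Set.mem_add s (f a) x).mpr (Or.inl hs))
        · rcases List.mem_cons.mp hn with rfl | hn'
          · exact Or.inl ((PySem.Set.mem_add s (f n) x).mpr (Or.inr h2.symm))
          · exact Or.inr ⟨n, hn', h1, h2⟩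

-- a positive intersection size as an existential
theorem inter_pos_iff (s t : PySem.Set String) :
    ((0 : Int) < PySem.Set.len (PySem.Set.inter s t)) ↔ ∃ x, x ∈ s ∧ x ∈ t := by
  constructor
  · intro h
    have hne : PySem.Set.inter s t ≠ [] := by
      intro hn; rw [hn] at h; simp [PySem.Set.len] at h
    rcases List.exists_mem_of_ne_nil _ hne with ⟨x, hx⟩
    exact ⟨x, (PySem.Set.mem_inter s t x).mp hx⟩
  · rintro ⟨x, hx⟩
    have hm := (PySem.Set.mem_inter s t x).mpr hx
    simp only [PySem.Set.len]
    exact_mod_cast List.length_pos_of_mem hm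

-- membership in B's sorted-filtered-deduplicated surname list
theorem mem_sfo {α : Type} [DecidableEq α] (f : α → String) (l : List α) (x : String) :
    (x ∈ PySem.List.sorted ((PySem.Set.ofList (l.map f)).filter (· ≠ "")) (fun x => x) false) ↔
      ∃ n ∈ l, f n ≠ "" ∧ f n = x := by
  rw [PySem.List.mem_sorted, List.mem_filter]
  constructor
  · rintro ⟨hm, hne⟩
    rcases List.mem_map.mp ((PySem.Set.mem_ofList _ _).mp hm) with ⟨n, hn, rfl⟩
    exact ⟨n, hn, by simpa using hne, rfl⟩
  · rintro ⟨n, hn, h1, rfl⟩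
    exact ⟨(PySem.Set.mem_ofList _ _).mpr (List.mem_map.mpr ⟨n, hn, rfl⟩), by simpa using h1⟩

theorem match_authors_eq (arxiv_entry : List (String × String)) (crossref_entry : List (String × List (List (String × String)))) :
    match_authors_between_arxiv_and_crossref arxiv_entry crossref_entry =
      match_authors_between_arxiv_and_crossref_alt arxiv_entry crossref_entry := by
  unfold match_authors_between_arxiv_and_crossref match_authors_between_arxiv_and_crossref_alt
  by_cases hg : ((arxiv_entry.lookup "author").isNone || (crossref_entry.lookup "author").isNone) = true
  · rw [if_pos hg, if_pos hg]
  · rw [if_neg hg, if_neg hg]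
    simp only [ne_eq]
    set L := (PySem.Str.split? ((arxiv_entry.lookup "author").getD "") " and ").getD [] with hL
    set C := (crossref_entry.lookup "author").getD [] with hC
    have hA : ∀ x : String,
        (x ∈ L.foldl (fun s full_name => if pvSurnameA full_name ≠ "" then PySem.Set.add s (pvSurnameA full_name) else s) PySem.Set.empty)
          ↔ ∃ n ∈ L, pvSurnameA n ≠ "" ∧ pvSurnameA n = x := by
      intro x
      rw [mem_foldl_addif pvSurnameA L PySem.Set.empty x]
      simp [PySem.Set.empty]
    have hCm : ∀ x : String,
        (x ∈ C.foldl (fun s author_dict => if PySem.Str.lower (PySem.Str.strip ((author_dict.lookup "family").getD "")) ≠ "" then PySem.Set.add s (PySem.Str.lower (PySem.Str.strip ((author_dict.lookup "family").getD ""))) else s) PySem.Set.empty)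
          ↔ ∃ d ∈ C, PySem.Str.lower (PySem.Str.strip ((d.lookup "family").getD "")) ≠ "" ∧ PySem.Str.lower (PySem.Str.strip ((d.lookup "family").getD "")) = x := by
      intro x
      rw [mem_foldl_addif (fun d : List (String × String) => PySem.Str.lower (PySem.Str.strip ((d.lookup "family").getD ""))) C PySem.Set.empty x]
      simp [PySem.Set.empty]
    have hmerge := pvMergeB_iff
      (PySem.List.sorted ((PySem.Set.ofList (L.map pvSurnameB)).filter (· ≠ "")) (fun x => x) false)
      (PySem.List.sorted ((PySem.Set.ofList (C.map (fun d => PySem.Str.lower (PySem.Str.strip ((d.lookup "family").getD ""))))).filter (· ≠ "")) (fun x => x) false)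
      (PySem.List.sorted_pairwise _ _) (PySem.List.sorted_pairwise _ _)
    rw [Bool.eq_iff_iff, hmerge]
    constructor
    · -- A true → B true (a common surname exists)
      intro hx
      split_ifs at hx with hemp
      have hpos := of_decide_eq_true hx
      rcases (inter_pos_iff _ _).mp hpos with ⟨x, hx1, hx2⟩
      rcases (hA x).mp hx1 with ⟨n, hn, h1, h2⟩
      rcases (hCm x).mp hx2 with ⟨d, hd, h3, h4⟩
      refine ⟨x, (mem_sfo pvSurnameB L x).mpr ⟨n, hn, ?_, ?_⟩, (mem_sfo _ C x).mpr ⟨d, hd, h3, h4⟩⟩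
      · rw [← pvSurname_eq]; exact h1
      · rw [← pvSurname_eq]; exact h2
    · -- B true → A true
      rintro ⟨x, hx1, hx2⟩
      rcases (mem_sfo pvSurnameB L x).mp hx1 with ⟨n, hn, h1, h2⟩
      rcases (mem_sfo _ C x).mp hx2 with ⟨d, hd, h3, h4⟩
      have h1' : pvSurnameA n ≠ "" := by rw [pvSurname_eq]; exact h1
      have h2' : pvSurnameA n = x := by rw [pvSurname_eq]; exact h2
      have hmemA := (hA x).mpr ⟨n, hn, h1', h2'⟩
      have hmemC := (hCm x).mpr ⟨d, hd, h3, h4⟩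
      split_ifs with hemp
      · exfalso
        rcases Bool.or_eq_true_iff.mp hemp with he | he
        · exact absurd (of_decide_eq_true he) (List.ne_nil_of_mem hmemA)
        · exact absurd (of_decide_eq_true he) (List.ne_nil_of_mem hmemC)
      · exact decide_eq_true ((inter_pos_iff _ _).mpr ⟨x, hmemA, hmemC⟩)

-- ===== VERDICT (by name: the statement is the Claim_ definition above) =====
theorem match_authors_between_arxiv_and_crossref_spec : Claim_equal_match_authors_between_arxiv_and_crossref := by
  intro a c _
  unfold Spec_match_authors_between_arxiv_and_crossref
  exact match_authors_eq a c
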